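-- pv_equiv track=rewrite | github.com/bhdreamer/tf_text_cnn | auto_nn/text_eval.py | _read_term
-- ===== SOURCE A (Python) =====
-- def _read_term(seg_sent):
--     term = []
--     words = seg_sent.strip().split()
--     for word in words:
--         if len(word) == 1:
--             term.append('S')
--         else:
--             for i in range(len(word)):
--                 if i == 0:
--                     term.append('L')
--                 elif i == len(word) - 1:
--                     term.append('R')
--                 else:
--                     term.append('M')
--     return term
-- ===== SOURCE B (Python) =====
-- def _read_term(seg_sent):
--     # One pass over the characters: classify each non-space character by its
--     # neighbours (previous-space flag + one-char lookahead); no strip/split.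
--     term = []
--     prev_space = True
--     for c, nxt in zip(seg_sent, seg_sent[1:] + ' '):
--         if not c.isspace():
--             if prev_space:
--                 term.append('S' if nxt.isspace() else 'L')
--             else:
--                 term.append('R' if nxt.isspace() else 'M')
--         prev_space = c.isspace()
--     return term
-- ===== Notes on version B (the rewrite author's own statement) =====
-- stated objective: alternative
-- what changed: Replaces A's strip/split into words followed by a per-word positional index loop by a single character-level pass over the raw string that classifies each non-space character from a previous-space flag and a one-character lookahead, never materialising the word list.
import Mathlib
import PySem

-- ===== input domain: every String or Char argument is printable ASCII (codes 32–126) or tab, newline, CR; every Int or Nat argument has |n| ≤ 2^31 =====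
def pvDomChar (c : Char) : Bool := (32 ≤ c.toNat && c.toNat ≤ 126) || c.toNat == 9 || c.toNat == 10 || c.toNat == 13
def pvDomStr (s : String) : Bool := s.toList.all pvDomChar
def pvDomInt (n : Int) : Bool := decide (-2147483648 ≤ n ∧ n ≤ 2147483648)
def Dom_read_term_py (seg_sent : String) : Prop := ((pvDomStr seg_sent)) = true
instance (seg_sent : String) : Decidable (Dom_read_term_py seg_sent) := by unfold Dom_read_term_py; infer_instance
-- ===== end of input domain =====

-- B replaces A's strip/split and per-word positional loop by a single character-level pass
-- classifying each non-space character from a previous-space flag and a one-char lookahead;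
-- the return values are proved equal.

-- ===== PORT A =====
def read_term_py (seg_sent : String) : List String :=
  let words := PySem.Str.split₀ (PySem.Str.strip seg_sent)
  words.foldl (fun term word =>
    if PySem.Str.len word = 1 then term ++ ["S"]
    else (PySem.List.pyRange 0 (PySem.Str.len word)).foldl (fun term i =>
      if i = 0 then term ++ ["L"]
      else if i = PySem.Str.len word - 1 then term ++ ["R"]
      else term ++ ["M"]) term) []

-- ===== PORT B =====
-- zip(seg_sent, seg_sent[1:] + ' ') with state (term, prev_space)
def read_term_py_alt (seg_sent : String) : List String :=
  let cs := seg_sent.toList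
  ((List.zip cs (PySem.List.slice cs (some 1) none ++ [' '])).foldl
    (fun st p =>
      if PySem.Chars.isspace p.1 = false then
        (st.1 ++ [if st.2 then (if PySem.Chars.isspace p.2 then "S" else "L")
                  else (if PySem.Chars.isspace p.2 then "R" else "M")],
         PySem.Chars.isspace p.1)
      else (st.1, PySem.Chars.isspace p.1))
    ([], true)).1

-- ===== PRECONDITION & SPEC =====
def Spec_read_term_py (seg_sent : String) (out : List String) : Prop := out = read_term_py_alt seg_sent
instance (seg_sent : String) (out : List String) : Decidable (Spec_read_term_py seg_sent out) := by unfold Spec_read_term_py; infer_instance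

-- ===== CLAIM (what is proved, stated in full; the proofs are below) =====
def Claim_equal_read_term_py : Prop := ∀ (seg_sent : String), Dom_read_term_py seg_sent → Spec_read_term_py seg_sent (read_term_py seg_sent)

-- ===== LEMMAS AND PROOFS =====

-- the tag segment of a whole word of length n (n ≥ 1)
def pvWordTags (n : Nat) : List String :=
  if n = 1 then ["S"] else "L" :: List.replicate (n - 2) "M" ++ ["R"]

-- the tags of a word's first n chars while the word is still open
def pvOpenTags (n : Nat) : List String := "L" :: List.replicate (n - 1) "M"

-- B's scan, written as a recursion (prev = "previous char was a space / start")
def pvScan (prev : Bool) : List Char → List String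
  | [] => []
  | c :: rest =>
    (if PySem.Chars.isspace c then []
     else [if prev then (if PySem.Chars.isspace (rest.headD ' ') then "S" else "L")
           else (if PySem.Chars.isspace (rest.headD ' ') then "R" else "M")])
    ++ pvScan (PySem.Chars.isspace c) rest

-- the split side, as a word-length accumulator (k = chars of the current word consumed)
def pvG (k : Nat) : List Char → List String
  | [] => if k = 0 then [] else pvWordTags k
  | c :: rest =>
    if PySem.Chars.isspace c then (if k = 0 then [] else pvWordTags k) ++ pvG 0 rest
    else pvG (k + 1) rest

-- what B has emitted for the k consumed chars of a word whose continuation is s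
def pvEmitted (k : Nat) (s : List Char) : List String :=
  if PySem.Chars.isspace (s.headD ' ') then pvWordTags k else pvOpenTags k

-- B's foldl over the zipped string is pvScan
lemma foldB_eq_scan (cs : List Char) : ∀ (prev : Bool) (term : List String),
    ((List.zip cs (cs.tail ++ [' '])).foldl
      (fun (st : List String × Bool) p =>
        if PySem.Chars.isspace p.1 = false then
          (st.1 ++ [if st.2 then (if PySem.Chars.isspace p.2 then "S" else "L")
                    else (if PySem.Chars.isspace p.2 then "R" else "M")],
           PySem.Chars.isspace p.1)
        else (st.1, PySem.Chars.isspace p.1))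
      (term, prev)).1 = term ++ pvScan prev cs := by
  induction cs with
  | nil => intro prev term; simp [pvScan]
  | cons c rest ih =>
    intro prev term
    have hz : List.zip (c :: rest) (rest ++ [' ']) =
        (c, rest.headD ' ') :: List.zip rest (rest.tail ++ [' ']) := by
      cases rest <;> rfl
    rw [show (c :: rest).tail = rest from rfl, hz, List.foldl_cons]
    by_cases hc : PySem.Chars.isspace c
    · rw [if_neg (by simp [hc])]
      rw [ih (PySem.Chars.isspace c) term]
      simp [pvScan, hc]
    · rw [if_pos (by simp [hc])]
      rw [ih (PySem.Chars.isspace c) _]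
      simp [pvScan, hc]

lemma scan_eq_G (s : List Char) :
    pvScan true s = pvG 0 s ∧
    (∀ k, 1 ≤ k → pvEmitted k s ++ pvScan false s = pvG k s) := by
  induction s with
  | nil =>
    constructor
    · rfl
    · intro k hk
      simp [pvEmitted, pvScan, pvG, PySem.Chars.isspace, Nat.pos_iff_ne_zero.mp hk]
  | cons c rest ih =>
    by_cases hc : PySem.Chars.isspace c
    · constructor
      · simp [pvScan, pvG, hc, ih.1]
      · intro k hk
        simp [pvEmitted, pvScan, pvG, hc, ih.1, Nat.pos_iff_ne_zero.mp hk]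
    · have hone : pvEmitted 1 rest = [if PySem.Chars.isspace (rest.headD ' ') then "S" else "L"] := by
        simp [pvEmitted, pvWordTags, pvOpenTags]
        split <;> rfl
      constructor
      · have := ih.2 1 le_rfl
        simp only [pvScan, pvG, hc]
        rw [← this, hone]
        simp
      · intro k hk
        have hIH := ih.2 (k + 1) (by omega)
        simp only [pvScan, pvG, hc]
        rw [← hIH]
        have hseg : pvEmitted k (c :: rest) ++ [if PySem.Chars.isspace (rest.headD ' ') then "R" else "M"]
            = pvEmitted (k + 1) rest := by
          simp only [pvEmitted, List.headD_cons, hc]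
          by_cases hb : PySem.Chars.isspace (rest.headD ' ')
          · simp only [hb, if_pos]
            simp [pvOpenTags, pvWordTags, Nat.pos_iff_ne_zero.mp hk]
          · simp only [hb]
            simp [pvOpenTags]
            rw [← List.replicate_succ', show k - 1 + 1 = k from by omega]
        rw [← hseg]
        simp
-- all-space suffixes do not change B's scan
lemma scan_ws (ts : List Char) (hts : ∀ c ∈ ts, PySem.Chars.isspace c = true) :
    ∀ prev, pvScan prev ts = [] := by
  induction ts with
  | nil => intro prev; rfl
  | cons c rest ih =>
    intro prev
    have hc := hts c (by simp)
    simp [pvScan, hc, ih (fun d hd => hts d (by simp [hd]))]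

lemma scan_append_ws (cs : List Char) (ts : List Char)
    (hts : ∀ c ∈ ts, PySem.Chars.isspace c = true) :
    ∀ prev, pvScan prev (cs ++ ts) = pvScan prev cs := by
  induction cs with
  | nil => intro prev; simpa using scan_ws ts hts prev
  | cons c rest ih =>
    intro prev
    have hhd : PySem.Chars.isspace ((rest ++ ts).headD ' ') = PySem.Chars.isspace (rest.headD ' ') := by
      cases rest with
      | cons d rs => rfl
      | nil =>
        cases ts with
        | nil => rfl
        | cons t tts =>
          have := hts t (by simp)
          simp [this]
          decide
    simp only [List.cons_append, pvScan, hhd, ih]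

-- leading spaces do not change B's scan (prev = true)
lemma scan_dropWhile (cs : List Char) :
    pvScan true cs = pvScan true (cs.dropWhile PySem.Chars.isspace) := by
  induction cs with
  | nil => rfl
  | cons c rest ih =>
    by_cases hc : PySem.Chars.isspace c
    · simp [pvScan, hc, ih]
    · simp [hc]

lemma scan_strip (cs : List Char) :
    pvScan true cs = pvScan true (PySem.Chars.strip cs) := by
  rw [scan_dropWhile cs]
  unfold PySem.Chars.strip PySem.Chars.lstrip PySem.Chars.rstrip
  set d := cs.dropWhile PySem.Chars.isspace with hd
  have hsplit : d = (List.dropWhile PySem.Chars.isspace d.reverse).reverse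
      ++ (List.takeWhile PySem.Chars.isspace d.reverse).reverse := by
    conv_lhs => rw [← List.reverse_reverse d,
      ← List.takeWhile_append_dropWhile (p := PySem.Chars.isspace) (l := d.reverse)]
    rw [List.reverse_append]
  conv_lhs => rw [hsplit]
  exact scan_append_ws _ _
    (fun c hc => List.mem_takeWhile_imp (List.mem_reverse.mp hc)) true

-- split₀.go, summed through word tags, is pvG
lemma go_eq_G (s : List Char) : ∀ (cur : List Char) (acc : List (List Char)),
    (PySem.Chars.split₀.go s cur acc).flatMap (fun w => pvWordTags w.length)
      = acc.reverse.flatMap (fun w => pvWordTags w.length) ++ pvG cur.length s := by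
  induction s with
  | nil =>
    intro cur acc
    simp only [PySem.Chars.split₀.go]
    cases cur with
    | nil => simp [pvG]
    | cons x xs => simp [pvG, List.flatMap_append]
  | cons c rest ih =>
    intro cur acc
    simp only [PySem.Chars.split₀.go]
    by_cases hc : PySem.Chars.isspace c
    · rw [if_pos hc]
      cases cur with
      | nil => simp only [List.isEmpty_nil, if_true]; simp [ih, pvG, hc]
      | cons x xs =>
        rw [if_neg (by simp)]
        rw [ih]
        simp [pvG, hc, List.flatMap_append]
    · rw [if_neg hc]
      rw [ih]
      simp [pvG, hc]

-- every word produced by str.split() is nonempty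
lemma split₀_go_ne_nil (s cur : List Char) (acc : List (List Char))
    (hacc : ∀ w ∈ acc, w ≠ []) : ∀ w ∈ PySem.Chars.split₀.go s cur acc, w ≠ [] := by
  induction s generalizing cur acc with
  | nil =>
    intro w hw
    simp only [PySem.Chars.split₀.go] at hw
    split at hw
    · exact hacc w (List.mem_reverse.mp hw)
    · next hcur =>
      rw [List.mem_reverse, List.mem_cons] at hw
      rcases hw with rfl | hw
      · simp only [List.isEmpty_iff] at hcur
        simpa using hcur
      · exact hacc w hw
  | cons c rest ih =>
    intro w hw
    simp only [PySem.Chars.split₀.go] at hw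
    split at hw
    · split at hw
      · exact ih [] acc hacc w hw
      · next hcur =>
        refine ih [] _ ?_ w hw
        intro v hv
        rcases List.mem_cons.mp hv with rfl | hv
        · simp only [List.isEmpty_iff] at hcur
          simpa using hcur
        · exact hacc v hv
    · exact ih (c :: cur) acc hacc w hw

lemma split₀_word_ne_nil (t w : String) (hw : w ∈ PySem.Str.split₀ t) : w.toList ≠ [] := by
  unfold PySem.Str.split₀ at hw
  rcases List.mem_map.mp hw with ⟨cs, hcs, rfl⟩
  rw [String.toList_ofList]
  exact split₀_go_ne_nil t.toList [] [] (by simp) cs hcs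

-- A's inner loop over a word of length n ≥ 2 produces exactly the word's tag segment
lemma inner_loop_eq (n : Int) (h2 : 2 ≤ n) :
    (PySem.List.pyRange 0 n).map
      (fun i => if i = 0 then "L" else if i = n - 1 then "R" else "M")
    = ("L" :: List.replicate (n - 2).toNat "M" ++ ["R"]) := by
  have hsplit : PySem.List.pyRange (0 : Int) n = 0 :: (PySem.List.pyRange 1 (n - 1) ++ [n - 1]) := by
    rw [PySem.List.pyRange_one_append 0 1 n (by omega) (by omega)]
    rw [show PySem.List.pyRange (1 : Int) n = PySem.List.pyRange 1 (n - 1) ++ [n - 1] from by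
      conv_lhs => rw [show n = (n - 1) + 1 from by omega]
      exact PySem.List.pyRange_one_succ_right (by omega)]
    rw [show PySem.List.pyRange (0 : Int) 1 = [0] from by
      simpa using PySem.List.pyRange_one_singleton (0 : Int)]
    rfl
  rw [hsplit]
  simp only [List.map_cons, List.map_append, List.map_cons, List.map_nil]
  have hne0 : ¬ (n - 1 : Int) = 0 := by omega
  have hmid : (PySem.List.pyRange (1 : Int) (n - 1)).map
      (fun i => if i = 0 then "L" else if i = n - 1 then "R" else "M")
      = List.replicate (n - 2).toNat "M" := by
    rw [List.eq_replicate_iff]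
    constructor
    · rw [List.length_map, PySem.List.length_pyRange_one]
      omega
    · intro b hb
      rcases List.mem_map.mp hb with ⟨i, hi, rfl⟩
      have := PySem.List.mem_pyRange_one.mp hi
      rw [if_neg (by omega), if_neg (by omega)]
  rw [hmid]
  simp [hne0]

-- A's outer loop is the word-tag flatMap
lemma outer_eq (ws : List String) (hne : ∀ w ∈ ws, w.toList ≠ []) :
    ws.foldl (fun term word =>
      if PySem.Str.len word = 1 then term ++ ["S"]
      else (PySem.List.pyRange 0 (PySem.Str.len word)).foldl (fun term i =>
        if i = 0 then term ++ ["L"]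
        else if i = PySem.Str.len word - 1 then term ++ ["R"]
        else term ++ ["M"]) term) []
    = ws.flatMap (fun word => pvWordTags word.toList.length) := by
  rw [PySem.List.foldl_congr_mem'
      (g := fun term word => term ++ pvWordTags word.toList.length)]
  · exact PySem.List.foldl_append_eq_flatMap _ _ []
  · intro w hw acc
    have hlen : (1 : Int) ≤ PySem.Str.len w := by
      rw [PySem.Str.len_eq]
      have : w.toList.length ≠ 0 := fun h => hne w hw (List.eq_nil_of_length_eq_zero h)
      omega
    by_cases h1 : PySem.Str.len w = 1
    · have h1' : w.toList.length = 1 := by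
        have := PySem.Str.len_eq w; omega
      simp [pvWordTags, h1']
    · have h2 : (2 : Int) ≤ PySem.Str.len w := by omega
      rw [if_neg h1]
      rw [show (fun (term : List String) (i : Int) =>
            if i = 0 then term ++ ["L"]
            else if i = PySem.Str.len w - 1 then term ++ ["R"]
            else term ++ ["M"])
          = (fun term i => term ++ [if i = 0 then "L" else if i = PySem.Str.len w - 1 then "R" else "M"])
          from by funext t i; split_ifs <;> rfl]
      rw [PySem.List.foldl_append_singleton_eq_map, inner_loop_eq _ h2]
      have hn : 2 ≤ w.toList.length := by have := PySem.Str.len_eq w; omega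
      unfold pvWordTags
      rw [if_neg (show ¬ w.toList.length = 1 by omega)]
      rw [PySem.Str.len_eq w,
        show ((w.toList.length : Int) - 2).toNat = w.toList.length - 2 from by omega]

-- s[1:] is the tail
lemma slice_one_eq_tail (cs : List Char) :
    PySem.List.slice cs (some 1) none = cs.tail := by
  rw [PySem.List.slice_from cs (by norm_num : (0 : Int) ≤ 1)]
  simp

-- ===== VERDICT (by name: the statement is the Claim_ definition above) =====
theorem read_term_py_spec : Claim_equal_read_term_py := by
  intro s _
  show read_term_py s = read_term_py_alt s
  unfold read_term_py read_term_py_alt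
  dsimp only
  rw [slice_one_eq_tail, foldB_eq_scan, List.nil_append]
  rw [scan_strip]
  rw [outer_eq _ (fun w hw => split₀_word_ne_nil _ w hw)]
  have hsplit : PySem.Str.split₀ (PySem.Str.strip s)
      = (PySem.Chars.split₀ (PySem.Chars.strip s.toList)).map String.ofList := by
    simp [PySem.Str.split₀]
  rw [hsplit, List.flatMap_map]
  have : (fun cs => pvWordTags (String.ofList cs).toList.length)
      = (fun cs : List Char => pvWordTags cs.length) := by
    funext cs; rw [String.toList_ofList]
  rw [this]
  unfold PySem.Chars.split₀
  rw [go_eq_G, (scan_eq_G _).1]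
  simp
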